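-- pv_equiv track=rewrite | github.com/rricocuevas1/ssdforgetting | query_based_amnesia.py | compute_frequency
-- ===== SOURCE A (Python) =====
-- def compute_frequency(n_rows, queries):
--     weight = [0]*n_rows
--     n_queries = len(queries)
--     for i in range(n_rows):
--         for j in range(n_queries):
--             answer_set = queries[j][0]
--             if i in answer_set:
--                 weight[i] = weight[i] + 1
--     return weight
-- ===== SOURCE B (Python) =====
-- def compute_frequency(n_rows, queries):
--     if n_rows <= 0:
--         return []
--     weight = [0] * n_rows
--     for q in queries:
--         for i in set(q[0]):
--             if 0 <= i < n_rows:
--                 weight[i] += 1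
--     return weight
-- ===== Notes on version B (the rewrite author's own statement) =====
-- stated objective: faster
-- what changed: Instead of scanning every answer set once per row (for each of n_rows rows testing membership in each query's answer set), B makes one pass over the queries and scatters +1 into the weight array for each distinct in-range index of each answer set.
import Mathlib
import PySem

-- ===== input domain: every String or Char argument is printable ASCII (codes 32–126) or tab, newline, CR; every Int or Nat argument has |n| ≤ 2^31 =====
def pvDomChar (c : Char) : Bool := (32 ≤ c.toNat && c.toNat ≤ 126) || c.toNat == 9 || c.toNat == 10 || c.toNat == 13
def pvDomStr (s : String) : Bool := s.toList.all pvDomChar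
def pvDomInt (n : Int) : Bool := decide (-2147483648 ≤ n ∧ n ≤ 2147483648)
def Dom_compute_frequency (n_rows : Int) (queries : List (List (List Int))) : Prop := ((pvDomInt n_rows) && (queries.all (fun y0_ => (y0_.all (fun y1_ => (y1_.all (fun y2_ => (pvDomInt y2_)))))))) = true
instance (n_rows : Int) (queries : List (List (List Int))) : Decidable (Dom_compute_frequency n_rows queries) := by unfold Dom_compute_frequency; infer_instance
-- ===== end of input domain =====

-- B replaces A's row-by-row membership scan (every answer set scanned once per row) by a single
-- scatter pass over the answer sets, incrementing the weight of each distinct in-range index.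

-- ===== PORT A =====
def compute_frequency (n_rows : Int) (queries : List (List (List Int))) : List Int :=
  let weight : List Int := List.replicate n_rows.toNat 0   -- [0]*n_rows ([] when n_rows ≤ 0, as in Python)
  let n_queries : Int := (queries.length : Int)
  (PySem.List.pyRange 0 n_rows 1).foldl (fun weight i =>
    (PySem.List.pyRange 0 n_queries 1).foldl (fun weight j =>
      -- answer_set = queries[j][0]; j is always in range; the [0] raises IndexError on an
      -- empty query (those inputs are excluded by Pre_), ported total via pyGetD
      let answer_set := PySem.List.pyGetD (PySem.List.pyGetD queries j []) 0 []
      if i ∈ answer_set then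
        PySem.List.pySetD weight i (PySem.List.pyGetD weight i 0 + 1)   -- weight[i] = weight[i] + 1
      else weight)
      weight)
    weight

-- ===== PORT B =====
def compute_frequency_alt (n_rows : Int) (queries : List (List (List Int))) : List Int :=
  if n_rows ≤ 0 then []
  else
    queries.foldl (fun weight q =>
      -- q[0] raises IndexError on an empty query (excluded by Pre_), ported total via pyGetD;
      -- set(q[0]) iteration order: the increments commute, so the result cannot depend on it
      (PySem.Set.ofList (PySem.List.pyGetD q 0 [])).foldl (fun weight i =>
        if 0 ≤ i ∧ i < n_rows then
          PySem.List.pySetD weight i (PySem.List.pyGetD weight i 0 + 1)   -- weight[i] += 1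
        else weight)
        weight)
      (List.replicate n_rows.toNat 0)

-- ===== PRECONDITION & SPEC =====
-- Pre_ excludes exactly the inputs where the Pythons raise IndexError (some query is the empty
-- list while n_rows > 0, so queries[j][0] is evaluated and fails); both A and B raise there.
def Pre_compute_frequency (n_rows : Int) (queries : List (List (List Int))) : Prop :=
  n_rows ≤ 0 ∨ ∀ q ∈ queries, q ≠ []
instance (n_rows : Int) (queries : List (List (List Int))) : Decidable (Pre_compute_frequency n_rows queries) := by unfold Pre_compute_frequency; infer_instance
def pvWitness_compute_frequency : Int × List (List (List Int)) := (2, [[[0, 1], [5]], [[1]]])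

def Spec_compute_frequency (n_rows : Int) (queries : List (List (List Int))) (out : List Int) : Prop := out = compute_frequency_alt n_rows queries
instance (n_rows : Int) (queries : List (List (List Int))) (out : List Int) : Decidable (Spec_compute_frequency n_rows queries out) := by unfold Spec_compute_frequency; infer_instance

-- ===== CLAIM (what is proved, stated in full; the proofs are below) =====
def Claim_equal_compute_frequency : Prop := ∀ (n_rows : Int) (queries : List (List (List Int))), Dom_compute_frequency n_rows queries → Pre_compute_frequency n_rows queries → Spec_compute_frequency n_rows queries (compute_frequency n_rows queries)

-- ===== LEMMAS AND PROOFS =====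

-- number of queries whose answer set contains j
def pvCnt (queries : List (List (List Int))) (j : Int) : Int :=
  (queries.countP (fun q => decide (j ∈ PySem.List.pyGetD q 0 [])) : Int)

-- the update weight[i] += 1 (0 ≤ i always), in List.set form
lemma pv_bump_eq (n : Int) :
    (fun (w : List Int) (i : Int) => if 0 ≤ i ∧ i < n then
        PySem.List.pySetD w i (PySem.List.pyGetD w i 0 + 1) else w)
      = (fun w i => if 0 ≤ i ∧ i < n then w.set i.toNat (w[i.toNat]?.getD 0 + 1) else w) := by
  funext w i
  split_ifs with h
  · rw [PySem.List.pySetD_of_nonneg w _ h.1, PySem.List.pyGetD_of_nonneg w _ h.1,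
      List.getD_eq_getElem?_getD]
  · rfl

lemma pv_bump_fold_eq (n : Int) (s : List Int) (w : List Int) :
    s.foldl (fun w i => if 0 ≤ i ∧ i < n then
        PySem.List.pySetD w i (PySem.List.pyGetD w i 0 + 1) else w) w
      = s.foldl (fun w i => if 0 ≤ i ∧ i < n then w.set i.toNat (w[i.toNat]?.getD 0 + 1) else w) w := by
  rw [pv_bump_eq]

lemma pv_A_body_eq (k : Int) (hk0 : 0 ≤ k) :
    (fun (w : List Int) (q : List (List Int)) => if k ∈ PySem.List.pyGetD q 0 [] then
        PySem.List.pySetD w k (PySem.List.pyGetD w k 0 + 1) else w)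
      = (fun w q => if k ∈ PySem.List.pyGetD q 0 [] then
          w.set k.toNat (w[k.toNat]?.getD 0 + 1) else w) := by
  funext w q
  split_ifs with h
  · rw [PySem.List.pySetD_of_nonneg w _ hk0, PySem.List.pyGetD_of_nonneg w _ hk0,
      List.getD_eq_getElem?_getD]
  · rfl

-- A's inner loop: all the j-iterations for one row k add the count at index k
lemma pv_A_inner (queries : List (List (List Int))) (k : Int) (w : List Int)
    (hk : k.toNat < w.length) :
    queries.foldl (fun w q => if k ∈ PySem.List.pyGetD q 0 [] then
        w.set k.toNat (w[k.toNat]?.getD 0 + 1) else w) w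
      = w.set k.toNat (w[k.toNat]?.getD 0 + pvCnt queries k) := by
  induction queries generalizing w with
  | nil =>
      simp only [List.foldl_nil, pvCnt, List.countP_nil, Nat.cast_zero, add_zero,
        List.getElem?_eq_getElem hk, Option.getD_some, List.set_getElem_self]
  | cons q qs ih =>
      by_cases h : k ∈ PySem.List.pyGetD q 0 []
      · have hk' : k.toNat < (w.set k.toNat (w[k.toNat]?.getD 0 + 1)).length := by simpa using hk
        rw [List.foldl_cons, if_pos h, ih _ hk', List.getElem?_set_self hk, Option.getD_some,
          List.set_set]
        congr 1
        simp [pvCnt, h]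
        ring
      · rw [List.foldl_cons, if_neg h, ih _ hk]
        congr 1
        simp [pvCnt, h]

-- A's inner loop in its ported shape (index loop over range(n_queries))
lemma pv_A_inner_raw (queries : List (List (List Int))) (k : Int) (w : List Int)
    (hk0 : 0 ≤ k) (hk : k.toNat < w.length) :
    (PySem.List.pyRange 0 (queries.length : Int) 1).foldl (fun w j =>
        if k ∈ PySem.List.pyGetD (PySem.List.pyGetD queries j []) 0 [] then
          PySem.List.pySetD w k (PySem.List.pyGetD w k 0 + 1) else w) w
      = w.set k.toNat (w[k.toNat]?.getD 0 + pvCnt queries k) := by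
  rw [PySem.List.foldl_pyRange_zero_pyGetD' queries []
      (fun (w : List Int) (q : List (List Int)) => if k ∈ PySem.List.pyGetD q 0 [] then
        PySem.List.pySetD w k (PySem.List.pyGetD w k 0 + 1) else w) w,
    pv_A_body_eq k hk0, pv_A_inner queries k w hk]

lemma pv_A_len (queries : List (List (List Int))) (l : List Int) (w : List Int)
    (hl : ∀ k ∈ l, 0 ≤ k ∧ k.toNat < w.length) :
    (l.foldl (fun w (k : Int) => (PySem.List.pyRange 0 (queries.length : Int) 1).foldl (fun w j =>
        if k ∈ PySem.List.pyGetD (PySem.List.pyGetD queries j []) 0 [] then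
          PySem.List.pySetD w k (PySem.List.pyGetD w k 0 + 1) else w) w) w).length
      = w.length := by
  induction l generalizing w with
  | nil => rfl
  | cons k l ih =>
      rw [List.foldl_cons,
        pv_A_inner_raw _ _ _ (hl k (by simp)).1 (hl k (by simp)).2,
        ih _ (fun k' hk' => by simpa using hl k' (by simp [hk']))]
      simp

lemma pv_A_outer (queries : List (List (List Int))) (l : List Int) (hnd : l.Nodup)
    (w : List Int) (hl : ∀ k ∈ l, 0 ≤ k ∧ k.toNat < w.length) (j : Nat) (hj : j < w.length) :
    ((l.foldl (fun w (k : Int) => (PySem.List.pyRange 0 (queries.length : Int) 1).foldl (fun w j =>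
        if k ∈ PySem.List.pyGetD (PySem.List.pyGetD queries j []) 0 [] then
          PySem.List.pySetD w k (PySem.List.pyGetD w k 0 + 1) else w) w) w)[j]?.getD 0)
      = w[j]?.getD 0 + (if (j : Int) ∈ l then pvCnt queries (j : Int) else 0) := by
  induction l generalizing w with
  | nil => simp
  | cons k l ih =>
      obtain ⟨hk, hnd'⟩ := List.nodup_cons.mp hnd
      obtain ⟨hk0, hkw⟩ := hl k (by simp)
      have hl' : ∀ k' ∈ l, 0 ≤ k' ∧ k'.toNat < (w.set k.toNat (w[k.toNat]?.getD 0 + pvCnt queries k)).length := by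
        intro k' hk'; simpa using hl k' (by simp [hk'])
      rw [List.foldl_cons, pv_A_inner_raw _ _ _ hk0 hkw, ih hnd' _ hl' (by simpa using hj)]
      by_cases hjk : j = k.toNat
      · have hj_eq : (j : Int) = k := by omega
        have hjs : ¬((j : Int) ∈ l) := by rw [hj_eq]; exact hk
        have hmem : (j : Int) ∈ k :: l := by rw [hj_eq]; exact List.mem_cons_self
        have hit : k.toNat = j := hjk.symm
        rw [hit, List.getElem?_set_self hj, Option.getD_some, if_neg hjs, if_pos hmem, hj_eq]
        ring
      · have hne : k.toNat ≠ j := fun he => hjk he.symm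
        have hji' : ((j : Int) = k) = False := by
          simp only [eq_iff_iff, iff_false]; omega
        rw [List.getElem?_set_ne hne]
        simp [hji']

-- B's inner loop: one query's (distinct) answer set adds its 0/1 indicator at each index
lemma pv_B_inner (n : Int) (s : List Int) (hs : s.Nodup) (w : List Int)
    (hw : (w.length : Int) = n) (j : Nat) (hj : j < w.length) :
    ((s.foldl (fun w i => if 0 ≤ i ∧ i < n then w.set i.toNat (w[i.toNat]?.getD 0 + 1) else w)
        w)[j]?.getD 0)
      = w[j]?.getD 0 + (if (j : Int) ∈ s then 1 else 0) := by
  induction s generalizing w with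
  | nil => simp
  | cons i s ih =>
      obtain ⟨hi, hnd'⟩ := List.nodup_cons.mp hs
      by_cases h : 0 ≤ i ∧ i < n
      · have hlen : (w.set i.toNat (w[i.toNat]?.getD 0 + 1)).length = w.length := by simp
        rw [List.foldl_cons, if_pos h,
          ih hnd' _ (by rw [hlen]; exact hw) (by rw [hlen]; exact hj)]
        by_cases hji : j = i.toNat
        · have hj_eq : (j : Int) = i := by omega
          have hjs : ¬((j : Int) ∈ s) := by rw [hj_eq]; exact hi
          have hmem : (j : Int) ∈ i :: s := by rw [hj_eq]; exact List.mem_cons_self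
          have hit : i.toNat = j := hji.symm
          rw [hit, List.getElem?_set_self hj, Option.getD_some, if_neg hjs, if_pos hmem]
          ring
        · have hne : i.toNat ≠ j := fun he => hji he.symm
          have hji' : ((j : Int) = i) = False := by
            simp only [eq_iff_iff, iff_false]; omega
          rw [List.getElem?_set_ne hne]
          simp [hji']
      · have hji : ((j : Int) = i) = False := by
          simp only [eq_iff_iff, iff_false]
          intro he
          apply h
          constructor <;> omega
        rw [List.foldl_cons, if_neg h, ih hnd' w hw hj]
        simp [hji]

lemma pv_B_inner_len (n : Int) (s : List Int) (w : List Int) :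
    (s.foldl (fun w i => if 0 ≤ i ∧ i < n then w.set i.toNat (w[i.toNat]?.getD 0 + 1) else w)
        w).length = w.length := by
  induction s generalizing w with
  | nil => rfl
  | cons i s ih =>
      by_cases h : 0 ≤ i ∧ i < n
      · rw [List.foldl_cons, if_pos h, ih, List.length_set]
      · rw [List.foldl_cons, if_neg h, ih]

lemma pv_B_outer (n : Int) (queries : List (List (List Int))) (w : List Int)
    (hw : (w.length : Int) = n) (j : Nat) (hj : j < w.length) :
    ((queries.foldl (fun w q => (PySem.Set.ofList (PySem.List.pyGetD q 0 [])).foldl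
        (fun w i => if 0 ≤ i ∧ i < n then w.set i.toNat (w[i.toNat]?.getD 0 + 1) else w) w)
        w)[j]?.getD 0)
      = w[j]?.getD 0 + pvCnt queries (j : Int) := by
  induction queries generalizing w with
  | nil => simp [pvCnt]
  | cons q qs ih =>
      have hlen := pv_B_inner_len n (PySem.Set.ofList (PySem.List.pyGetD q 0 [])) w
      rw [List.foldl_cons, ih _ (by rw [hlen]; exact hw) (by rw [hlen]; exact hj),
        pv_B_inner n _ (PySem.Set.nodup_ofList _) w hw j hj]
      have hmem := PySem.Set.mem_ofList (PySem.List.pyGetD q 0 []) (j : Int)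
      by_cases h : (j : Int) ∈ PySem.List.pyGetD q 0 []
      · simp only [pvCnt, List.countP_cons, hmem, h, decide_true, if_pos, Nat.cast_add]
        push_cast
        ring
      · simp only [pvCnt, List.countP_cons, h, decide_false]
        rw [if_neg (by rw [hmem]; exact h)]
        push_cast
        ring

lemma pv_B_outer_len (n : Int) (queries : List (List (List Int))) (w : List Int) :
    (queries.foldl (fun w q => (PySem.Set.ofList (PySem.List.pyGetD q 0 [])).foldl
        (fun w i => if 0 ≤ i ∧ i < n then w.set i.toNat (w[i.toNat]?.getD 0 + 1) else w) w)
        w).length = w.length := by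
  induction queries generalizing w with
  | nil => rfl
  | cons q qs ih => rw [List.foldl_cons, ih, pv_B_inner_len]

-- ===== VERDICT (by name: the statement is the Claim_ definition above) =====
theorem compute_frequency_spec : Claim_equal_compute_frequency := by
  intro n_rows queries _ _
  unfold Spec_compute_frequency compute_frequency compute_frequency_alt
  by_cases hn : n_rows ≤ 0
  · rw [if_pos hn, PySem.List.pyRange_one_eq_nil hn]
    simp [Int.toNat_of_nonpos hn]
  · rw [if_neg hn]
    rw [not_le] at hn
    simp only [pv_bump_fold_eq]
    set w0 : List Int := List.replicate n_rows.toNat 0 with hw0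
    have hw0len : w0.length = n_rows.toNat := by simp [hw0]
    have hlcond : ∀ k ∈ PySem.List.pyRange 0 n_rows 1, 0 ≤ k ∧ k.toNat < w0.length := by
      intro k hkm
      rw [PySem.List.mem_pyRange_one] at hkm
      exact ⟨hkm.1, by rw [hw0len]; omega⟩
    have hlA := pv_A_len queries (PySem.List.pyRange 0 n_rows 1) w0 hlcond
    have hlB := pv_B_outer_len n_rows queries w0
    have hwB : ((w0.length : Nat) : Int) = n_rows := by rw [hw0len]; omega
    apply List.ext_getElem?
    intro j
    by_cases hj : j < n_rows.toNat
    · rw [List.getElem?_eq_getElem (by rw [hlA, hw0len]; exact hj),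
        List.getElem?_eq_getElem (by rw [hlB, hw0len]; exact hj)]
      congr 1
      have h1 : ∀ (x : List Int) (h : j < x.length), x[j] = x[j]?.getD 0 := by
        intro x h
        rw [List.getElem?_eq_getElem h, Option.getD_some]
      rw [h1 _ (by rw [hlA, hw0len]; exact hj), h1 _ (by rw [hlB, hw0len]; exact hj),
        pv_A_outer queries (PySem.List.pyRange 0 n_rows 1) (PySem.List.nodup_pyRange_one _ _)
          w0 hlcond j (by rw [hw0len]; exact hj),
        pv_B_outer n_rows queries w0 hwB j (by rw [hw0len]; exact hj)]
      have hmem : (j : Int) ∈ PySem.List.pyRange 0 n_rows 1 := by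
        rw [PySem.List.mem_pyRange_one]
        constructor <;> omega
      rw [if_pos hmem]
    · rw [List.getElem?_eq_none (by rw [hlA, hw0len]; omega),
        List.getElem?_eq_none (by rw [hlB, hw0len]; omega)]
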